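-- pv_equiv track=rewrite | github.com/ai-bitmonky/stem-diagrams | core/diagram_planner.py | _forms_closed_loop_from_relations
-- ===== SOURCE A (Python) =====
-- from typing import Dict, List, Any, Optional, Tuple
--
-- def _forms_closed_loop_from_relations(relations: List[Dict]) -> bool:
--     """Check if relations form a closed loop"""
--     if len(relations) < 3:
--         return False
--
--     # Build adjacency graph
--     graph = {}
--     for rel in relations:
--         source = rel['source_id']
--         target = rel['target_id']
--         if source not in graph:
--             graph[source] = []
--         if target not in graph:
--             graph[target] = []
--         graph[source].append(target)
--         graph[target].append(source)
--
--     # Check if any node has degree >= 2 (suggests loop)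
--     for node, neighbors in graph.items():
--         if len(neighbors) >= 2:
--             return True
--
--     return False
-- ===== SOURCE B (Python) =====
-- from typing import Dict, List, Any, Optional, Tuple
--
-- def _forms_closed_loop_from_relations(relations: List[Dict]) -> bool:
--     """Check if relations form a closed loop"""
--     if len(relations) < 3:
--         return False
--     ids = set()
--     for rel in relations:
--         ids.add(rel['source_id'])
--         ids.add(rel['target_id'])
--     # fewer distinct endpoint ids than endpoint slots => some node has degree >= 2
--     return len(ids) < 2 * len(relations)
-- ===== Notes on version B (the rewrite author's own statement) =====
-- stated objective: simpler
-- what changed: Replaced the adjacency-dict construction plus degree-scanning loop by a single counting argument: collect the set of distinct endpoint ids and return len(relations) >= 3 and len(ids) < 2*len(relations), since a repeated endpoint id is exactly a node of degree >= 2.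
import Mathlib
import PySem

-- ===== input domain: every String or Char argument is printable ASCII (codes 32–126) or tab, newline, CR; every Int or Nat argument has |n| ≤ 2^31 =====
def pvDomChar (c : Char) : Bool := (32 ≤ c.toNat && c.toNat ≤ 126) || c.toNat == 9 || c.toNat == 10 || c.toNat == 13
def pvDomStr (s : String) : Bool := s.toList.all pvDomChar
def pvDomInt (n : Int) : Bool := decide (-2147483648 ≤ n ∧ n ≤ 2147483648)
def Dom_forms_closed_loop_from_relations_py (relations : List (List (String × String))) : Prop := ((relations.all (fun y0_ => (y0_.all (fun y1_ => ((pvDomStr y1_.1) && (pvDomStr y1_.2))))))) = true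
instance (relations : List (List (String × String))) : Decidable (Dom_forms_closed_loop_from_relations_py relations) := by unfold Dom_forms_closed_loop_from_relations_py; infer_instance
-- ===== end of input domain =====

-- B replaces A's adjacency-dict build and degree scan by one counting argument:
-- some endpoint id repeats (degree ≥ 2) iff the set of distinct endpoint ids is
-- smaller than the number of endpoint slots 2*len(relations). Objective: simpler.


-- ===== PORT A =====
-- shared helper: rel['source_id'] / rel['target_id'] (first-match dict lookup;
-- the "" default is never used under Pre_, where both keys are present)
def pvSrc (rel : List (String × String)) : String :=
  ((PySem.Dict.mk rel).get? "source_id").getD ""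
def pvTgt (rel : List (String × String)) : String :=
  ((PySem.Dict.mk rel).get? "target_id").getD ""

-- one iteration of A's graph-building loop; pvG2 is its two
-- "if key not in graph: graph[key] = []" initialisations, in order
def pvG2 (g : PySem.Dict String (List String)) (rel : List (String × String)) :
    PySem.Dict String (List String) :=
  let g1 := if g.contains (pvSrc rel) then g else g.insert (pvSrc rel) []
  if g1.contains (pvTgt rel) then g1 else g1.insert (pvTgt rel) []

def pvStepA (g : PySem.Dict String (List String)) (rel : List (String × String)) :
    PySem.Dict String (List String) :=
  ((pvG2 g rel).modify (pvSrc rel) [] (fun ns => ns ++ [pvTgt rel])).modify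
    (pvTgt rel) [] (fun ns => ns ++ [pvSrc rel])

def forms_closed_loop_from_relations_py (relations : List (List (String × String))) : Bool :=
  if relations.length < 3 then false
  else
    let graph := relations.foldl pvStepA PySem.Dict.empty
    graph.items.any (fun kv => decide (2 ≤ kv.2.length))

-- ===== PORT B =====
def forms_closed_loop_from_relations_py_alt (relations : List (List (String × String))) : Bool :=
  if relations.length < 3 then false
  else
    let ids := relations.foldl
      (fun s rel => PySem.Set.add (PySem.Set.add s (pvSrc rel)) (pvTgt rel)) PySem.Set.empty
    decide (PySem.Set.len ids < 2 * PySem.List.len relations)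

-- ===== PRECONDITION & SPEC =====
-- Pre_ excludes exactly the inputs where the Python raises KeyError: three or more
-- relations with some relation lacking a 'source_id' or 'target_id' key.
def Pre_forms_closed_loop_from_relations_py (relations : List (List (String × String))) : Prop :=
  relations.length < 3 ∨ ∀ rel ∈ relations,
    (PySem.Dict.mk rel).contains "source_id" = true ∧ (PySem.Dict.mk rel).contains "target_id" = true
instance (relations : List (List (String × String))) : Decidable (Pre_forms_closed_loop_from_relations_py relations) := by unfold Pre_forms_closed_loop_from_relations_py; infer_instance

def pvWitness_forms_closed_loop_from_relations_py : (List (List (String × String))) :=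
  [[("source_id", "a"), ("target_id", "b")],
   [("source_id", "b"), ("target_id", "c")],
   [("source_id", "c"), ("target_id", "a")]]

def Spec_forms_closed_loop_from_relations_py (relations : List (List (String × String))) (out : Bool) : Prop := out = forms_closed_loop_from_relations_py_alt relations
instance (relations : List (List (String × String))) (out : Bool) : Decidable (Spec_forms_closed_loop_from_relations_py relations out) := by unfold Spec_forms_closed_loop_from_relations_py; infer_instance

-- ===== CLAIM (what is proved, stated in full; the proofs are below) =====
def Claim_equal_forms_closed_loop_from_relations_py : Prop := ∀ (relations : List (List (String × String))), Dom_forms_closed_loop_from_relations_py relations → Pre_forms_closed_loop_from_relations_py relations → Spec_forms_closed_loop_from_relations_py relations (forms_closed_loop_from_relations_py relations)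

-- ===== LEMMAS AND PROOFS =====

-- the multiset of endpoint ids, two per relation
def pvEnds (relations : List (List (String × String))) : List String :=
  relations.flatMap (fun rel => [pvSrc rel, pvTgt rel])

theorem pvEnds_cons (rel : List (String × String)) (rs : List (List (String × String))) :
    pvEnds (rel :: rs) = pvSrc rel :: pvTgt rel :: pvEnds rs := by
  simp [pvEnds]

theorem pvEnds_length (relations : List (List (String × String))) :
    (pvEnds relations).length = 2 * relations.length := by
  induction relations with
  | nil => simp [pvEnds]
  | cons rel rs ih => rw [pvEnds_cons]; simp only [List.length_cons, ih]; omega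

-- pvG2 leaves every neighbour list unchanged (a fresh key gets [])
theorem pvG2_getD (g : PySem.Dict String (List String)) (rel : List (String × String)) :
    ∀ y, (pvG2 g rel).getD y [] = g.getD y [] := by
  intro y
  unfold pvG2
  have h1 : ∀ z, (if g.contains (pvSrc rel) then g else g.insert (pvSrc rel) []).getD z []
      = g.getD z [] := by
    intro z
    by_cases hcs : g.contains (pvSrc rel) = true
    · rw [if_pos hcs]
    · rw [if_neg (by simp [hcs]), PySem.Dict.getD_insert]
      by_cases hz : z = pvSrc rel
      · rw [if_pos hz, hz, PySem.Dict.getD_of_not_contains g [] (by simp [hcs])]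
      · rw [if_neg hz]
  by_cases hct : (if g.contains (pvSrc rel) then g else g.insert (pvSrc rel) []).contains (pvTgt rel) = true
  · rw [if_pos hct, h1]
  · rw [if_neg (by simp [hct]), PySem.Dict.getD_insert]
    by_cases hy : y = pvTgt rel
    · rw [if_pos hy, hy, ← h1 (pvTgt rel),
        PySem.Dict.getD_of_not_contains _ [] (by simp [hct])]
    · rw [if_neg hy, h1]

-- pvG2 adds the two endpoint ids to the key set
theorem pvG2_keys (g : PySem.Dict String (List String)) (rel : List (String × String)) :
    (pvG2 g rel).keys = PySem.Set.add (PySem.Set.add g.keys (pvSrc rel)) (pvTgt rel) := by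
  unfold pvG2
  have hk1 : (if g.contains (pvSrc rel) then g else g.insert (pvSrc rel) []).keys
      = PySem.Set.add g.keys (pvSrc rel) := by
    by_cases hcs : g.contains (pvSrc rel) = true
    · rw [if_pos hcs, PySem.Set.add_of_mem ((PySem.Dict.contains_iff_mem_keys g _).mp hcs)]
    · rw [if_neg (by simp [hcs]),
        PySem.Dict.keys_insert_of_not_contains g [] (by simp [hcs]),
        PySem.Set.add_of_not_mem
          (fun hm => hcs ((PySem.Dict.contains_iff_mem_keys g _).mpr hm))]
  by_cases hct : (if g.contains (pvSrc rel) then g else g.insert (pvSrc rel) []).contains (pvTgt rel) = true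
  · have htm : pvTgt rel ∈ PySem.Set.add g.keys (pvSrc rel) := by
      rw [← hk1]; exact (PySem.Dict.contains_iff_mem_keys _ _).mp hct
    rw [if_pos hct, hk1, PySem.Set.add_of_mem htm]
  · have htm : pvTgt rel ∉ PySem.Set.add g.keys (pvSrc rel) := by
      rw [← hk1]; exact fun hm => hct ((PySem.Dict.contains_iff_mem_keys _ _).mpr hm)
    rw [if_neg (by simp [hct]),
      PySem.Dict.keys_insert_of_not_contains _ [] (by simp [hct]), hk1,
      PySem.Set.add_of_not_mem htm]

-- one pass of A's loop: keys gain the two endpoint ids (as a set)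
theorem pvStepA_keys (g : PySem.Dict String (List String)) (rel : List (String × String)) :
    (pvStepA g rel).keys = PySem.Set.add (PySem.Set.add g.keys (pvSrc rel)) (pvTgt rel) := by
  unfold pvStepA
  have hs2 : pvSrc rel ∈ (pvG2 g rel).keys := by
    rw [pvG2_keys, PySem.Set.mem_add, PySem.Set.mem_add]; tauto
  have hk3 : ((pvG2 g rel).modify (pvSrc rel) [] (fun ns => ns ++ [pvTgt rel])).keys
      = (pvG2 g rel).keys := by
    rw [PySem.Dict.keys_modify,
      PySem.Dict.keys_insert_of_contains _ _ ((PySem.Dict.contains_iff_mem_keys _ _).mpr hs2)]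
  have ht3 : pvTgt rel ∈ ((pvG2 g rel).modify (pvSrc rel) [] (fun ns => ns ++ [pvTgt rel])).keys := by
    rw [hk3, pvG2_keys, PySem.Set.mem_add]; tauto
  rw [PySem.Dict.keys_modify,
    PySem.Dict.keys_insert_of_contains _ _ ((PySem.Dict.contains_iff_mem_keys _ _).mpr ht3),
    hk3, pvG2_keys]

-- one pass of A's loop: each neighbour list grows by its endpoint occurrences
theorem pvStepA_getD (g : PySem.Dict String (List String)) (rel : List (String × String)) :
    ∀ x, ((pvStepA g rel).getD x []).length
        = (g.getD x []).length + (if pvSrc rel = x then 1 else 0)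
          + (if pvTgt rel = x then 1 else 0) := by
  intro x
  unfold pvStepA
  simp only [PySem.Dict.getD_modify, pvG2_getD]
  by_cases hxt : x = pvTgt rel <;> by_cases hxs : x = pvSrc rel
  · have hts : pvTgt rel = pvSrc rel := hxt.symm.trans hxs
    rw [if_pos hxt, if_pos hts, if_pos hxs.symm, if_pos hxt.symm, hxs]
    simp [List.length_append]
  · rw [if_pos hxt, if_neg (fun h => hxs (hxt.trans h)),
      if_neg (fun h => hxs h.symm), if_pos hxt.symm, hxt]
    simp [List.length_append]
  · rw [if_neg hxt, if_pos hxs, if_pos hxs.symm, if_neg (fun h => hxt h.symm), hxs]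
    simp [List.length_append]
  · rw [if_neg hxt, if_neg hxs, if_neg (fun h => hxs h.symm),
      if_neg (fun h => hxt h.symm)]
    simp

-- A's loop invariant: keys accumulate the endpoint ids as a set, and each node's
-- neighbour-list length counts its occurrences among the endpoints
theorem pvFoldA_inv (relations : List (List (String × String)))
    (g : PySem.Dict String (List String)) (hnd : g.keys.Nodup) :
    (relations.foldl pvStepA g).keys = PySem.Set.update g.keys (pvEnds relations) ∧
    (relations.foldl pvStepA g).keys.Nodup ∧
    ∀ x, ((relations.foldl pvStepA g).getD x []).length
        = (g.getD x []).length + (pvEnds relations).count x := by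
  induction relations generalizing g with
  | nil => exact ⟨by simp [pvEnds, PySem.Set.update_nil], hnd, by simp [pvEnds]⟩
  | cons rel rs ih =>
    have hstep_keys := pvStepA_keys g rel
    have hstep_nd : (pvStepA g rel).keys.Nodup := by
      rw [hstep_keys]
      exact PySem.Set.nodup_add _ _ (PySem.Set.nodup_add _ _ hnd)
    have hstep_getD := pvStepA_getD g rel
    obtain ⟨hk, hnd', hc⟩ := ih (pvStepA g rel) hstep_nd
    refine ⟨?_, hnd', ?_⟩
    · rw [List.foldl_cons, hk, hstep_keys, pvEnds_cons,
        PySem.Set.update_cons, PySem.Set.update_cons]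
    · intro x
      rw [List.foldl_cons, hc x, hstep_getD x, pvEnds_cons]
      simp only [List.count_cons, beq_iff_eq]
      by_cases h1 : pvSrc rel = x <;> by_cases h2 : pvTgt rel = x <;>
        simp only [h1, h2, if_true, if_false] <;> omega

-- B's loop builds exactly set(endpoints)
theorem pvFoldB (relations : List (List (String × String))) (s : PySem.Set String) :
    relations.foldl
      (fun s rel => PySem.Set.add (PySem.Set.add s (pvSrc rel)) (pvTgt rel)) s
    = PySem.Set.update s (pvEnds relations) := by
  induction relations generalizing s with
  | nil => simp [pvEnds, PySem.Set.update]
  | cons rel rs ih =>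
    rw [List.foldl_cons, ih, pvEnds_cons, PySem.Set.update_cons, PySem.Set.update_cons]

-- |set(xs)| < |xs| iff xs has a duplicate
theorem pvOfList_lt_iff {xs : List String} :
    PySem.Set.len (PySem.Set.ofList xs) < PySem.List.len xs ↔ ¬ xs.Nodup := by
  have hperm : (PySem.Set.ofList xs).Perm xs.dedup := by
    rw [List.perm_ext_iff_of_nodup (PySem.Set.nodup_ofList xs) (List.nodup_dedup xs)]
    intro a; rw [PySem.Set.mem_ofList, List.mem_dedup]
  have hlen : (PySem.Set.ofList xs).length = xs.dedup.length := hperm.length_eq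
  have hle : xs.dedup.length ≤ xs.length := (List.dedup_sublist xs).length_le
  have key : xs.dedup.length < xs.length ↔ ¬ xs.Nodup := by
    constructor
    · intro hlt hnd
      rw [List.dedup_eq_self.mpr hnd] at hlt
      omega
    · intro hnnd
      rcases lt_or_eq_of_le hle with h | h
      · exact h
      · exact absurd (((List.dedup_sublist xs).eq_of_length h) ▸ List.nodup_dedup xs) hnnd
  simp only [PySem.Set.len, PySem.List.len, hlen, Nat.cast_lt]
  exact key

-- a duplicate endpoint is exactly a node of degree ≥ 2
theorem pvA_any_iff (relations : List (List (String × String))) :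
    ((relations.foldl pvStepA PySem.Dict.empty).items.any (fun kv => decide (2 ≤ kv.2.length)))
    = true ↔ ¬ (pvEnds relations).Nodup := by
  obtain ⟨hk, hnd, hc⟩ := pvFoldA_inv relations PySem.Dict.empty PySem.Dict.nodup_keys_empty
  set g := relations.foldl pvStepA PySem.Dict.empty with hg
  rw [PySem.Dict.items_eq_map_keys g hnd []]
  rw [List.any_map, List.any_eq_true]
  have hkeys : g.keys = PySem.Set.ofList (pvEnds relations) := by
    rw [hk, PySem.Dict.keys_empty, PySem.Set.update_nil_left]
  constructor
  · rintro ⟨k, hkmem, hdeg⟩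
    simp only [Function.comp, decide_eq_true_eq] at hdeg
    rw [hc k] at hdeg
    simp [PySem.Dict.getD_empty] at hdeg
    rw [List.nodup_iff_count_le_one]
    push Not
    exact ⟨k, by omega⟩
  · intro hnnd
    rw [List.nodup_iff_count_le_one] at hnnd
    push Not at hnnd
    obtain ⟨k, hk2⟩ := hnnd
    refine ⟨k, ?_, ?_⟩
    · rw [hkeys, PySem.Set.mem_ofList]
      exact List.count_pos_iff.mp (by omega)
    · simp only [Function.comp, decide_eq_true_eq]
      rw [hc k]
      simp [PySem.Dict.getD_empty]
      omega

-- ===== VERDICT (by name: the statement is the Claim_ definition above) =====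
theorem forms_closed_loop_from_relations_py_spec : Claim_equal_forms_closed_loop_from_relations_py := by
  intro relations _ _
  unfold Spec_forms_closed_loop_from_relations_py
  unfold forms_closed_loop_from_relations_py forms_closed_loop_from_relations_py_alt
  by_cases hlen : relations.length < 3
  · simp [hlen]
  · simp only [hlen, if_false]
    rw [pvFoldB relations PySem.Set.empty]
    have hupd : PySem.Set.update PySem.Set.empty (pvEnds relations)
        = PySem.Set.ofList (pvEnds relations) := PySem.Set.update_empty _
    rw [hupd]
    have h2n : 2 * PySem.List.len relations = PySem.List.len (pvEnds relations) := by
      simp only [PySem.List.len, pvEnds_length]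
      push_cast
      ring
    rw [h2n]
    rcases Bool.eq_false_or_eq_true
        ((relations.foldl pvStepA PySem.Dict.empty).items.any (fun kv => decide (2 ≤ kv.2.length))) with hA | hA
    · rw [hA]
      symm
      simp only [decide_eq_true_eq]
      exact pvOfList_lt_iff.mpr ((pvA_any_iff relations).mp hA)
    · rw [hA]
      have hnd : (pvEnds relations).Nodup := by
        by_contra hn
        rw [← pvA_any_iff relations] at hn
        rw [hA] at hn
        exact absurd hn (by decide)
      symm
      simp only [decide_eq_false_iff_not]
      rw [pvOfList_lt_iff]
      simp [hnd]
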